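-- pv_equiv track=rewrite | github.com/chris-khan-1/advent_of_code_public | src/aoc_2015/day_03/aoc_2015_03_solution.py | get_all_house_visit_coordinates
-- ===== SOURCE A (Python) =====
-- def get_next_house_cordinate(
--     start_coordinates: tuple, direction: str
-- ) -> tuple[int, int]:
--     x, y = start_coordinates
--     if direction == "^":
--         y += 1
--     if direction == ">":
--         x += 1
--     if direction == "v":
--         y -= 1
--     if direction == "<":
--         x -= 1
--     return (x, y)
--
-- def get_all_house_visit_coordinates(directions: str) -> list[tuple[int, int]]:
--     house_coordinates = [(0, 0)]
--     start_coordinates = (0, 0)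
--     for direction in directions:
--         next_visit_coordinates = get_next_house_cordinate(
--             start_coordinates=start_coordinates, direction=direction
--         )
--         house_coordinates.append(next_visit_coordinates)
--         start_coordinates = next_visit_coordinates
--     return house_coordinates
-- ===== SOURCE B (Python) =====
-- def get_all_house_visit_coordinates(directions: str) -> list[tuple[int, int]]:
--     DELTA = {"^": (0, 1), ">": (1, 0), "v": (0, -1), "<": (-1, 0)}
--
--     def walk(s: str) -> list[tuple[int, int]]:
--         # positions visited starting from (0, 0), computed by divide and conquer:
--         # split the moves in half, walk each half from the origin, then translate
--         # the right half's path by the left half's endpoint.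
--         if not s:
--             return [(0, 0)]
--         if len(s) == 1:
--             return [(0, 0), DELTA.get(s, (0, 0))]
--         mid = len(s) // 2
--         left = walk(s[:mid])
--         right = walk(s[mid:])
--         x, y = left[-1]
--         return left + [(x + a, y + b) for (a, b) in right[1:]]
--
--     return walk(directions)
-- ===== Notes on version B (the rewrite author's own statement) =====
-- stated objective: alternative
-- what changed: B computes the visited path by divide and conquer: it splits the move string in half, recursively walks each half from the origin, and merges by translating the right half's path by the left half's endpoint, instead of A's sequential step-and-append loop.
import Mathlib
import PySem

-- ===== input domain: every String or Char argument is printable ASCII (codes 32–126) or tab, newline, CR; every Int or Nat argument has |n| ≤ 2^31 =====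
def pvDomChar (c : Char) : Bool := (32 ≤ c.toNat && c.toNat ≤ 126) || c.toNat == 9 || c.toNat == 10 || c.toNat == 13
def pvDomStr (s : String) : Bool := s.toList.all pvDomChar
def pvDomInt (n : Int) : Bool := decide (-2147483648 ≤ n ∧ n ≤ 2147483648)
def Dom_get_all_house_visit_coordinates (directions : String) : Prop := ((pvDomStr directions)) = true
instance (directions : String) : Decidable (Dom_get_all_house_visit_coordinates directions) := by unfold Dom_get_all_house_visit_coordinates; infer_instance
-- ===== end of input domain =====

-- B replaces A's sequential step-and-append loop by a divide-and-conquer walk: split the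
-- move string in half, recursively walk each half from the origin, translate the right
-- half's path by the left half's endpoint; same result, alternative algorithm.

-- ===== PORT A =====
def get_next_house_cordinate (start_coordinates : Int × Int) (direction : Char) : Int × Int :=
  let x := start_coordinates.1
  let y := start_coordinates.2
  let y := if direction == '^' then y + 1 else y
  let x := if direction == '>' then x + 1 else x
  let y := if direction == 'v' then y - 1 else y
  let x := if direction == '<' then x - 1 else x
  (x, y)

def pvStepA (st : List (Int × Int) × (Int × Int)) (direction : Char) :
    List (Int × Int) × (Int × Int) :=
  let next_visit_coordinates := get_next_house_cordinate st.2 direction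
  (st.1 ++ [next_visit_coordinates], next_visit_coordinates)

def get_all_house_visit_coordinates (directions : String) : List (Int × Int) :=
  (directions.toList.foldl pvStepA ([(0, 0)], (0, 0))).1

-- ===== PORT B =====
def pvDELTA : PySem.Dict Char (Int × Int) :=
  PySem.Dict.ofList [('^', (0, 1)), ('>', (1, 0)), ('v', (0, -1)), ('<', (-1, 0))]

-- Source B's recursive divide-and-conquer walk; s[:mid]/s[mid:] are List.take/List.drop
-- (exact: mid is in range), left[-1] is getLastD (left is never empty).
def pvWalkB (cs : List Char) : List (Int × Int) :=
  match cs with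
  | [] => [(0, 0)]
  | [c] => [(0, 0), PySem.Dict.getD pvDELTA c (0, 0)]
  | c1 :: c2 :: rest =>
    let mid := (c1 :: c2 :: rest).length / 2
    let left := pvWalkB ((c1 :: c2 :: rest).take mid)
    let right := pvWalkB ((c1 :: c2 :: rest).drop mid)
    let p := left.getLastD (0, 0)
    left ++ (right.drop 1).map (fun q => (p.1 + q.1, p.2 + q.2))
termination_by cs.length
decreasing_by
  · simp [List.length_take]; omega
  · simp; omega

def get_all_house_visit_coordinates_alt (directions : String) : List (Int × Int) :=
  pvWalkB directions.toList

-- ===== PRECONDITION & SPEC =====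
def Spec_get_all_house_visit_coordinates (directions : String) (out : List (Int × Int)) : Prop := out = get_all_house_visit_coordinates_alt directions
instance (directions : String) (out : List (Int × Int)) : Decidable (Spec_get_all_house_visit_coordinates directions out) := by unfold Spec_get_all_house_visit_coordinates; infer_instance

-- ===== CLAIM (what is proved, stated in full; the proofs are below) =====
def Claim_equal_get_all_house_visit_coordinates : Prop := ∀ (directions : String), Dom_get_all_house_visit_coordinates directions → Spec_get_all_house_visit_coordinates directions (get_all_house_visit_coordinates directions)

-- ===== LEMMAS AND PROOFS =====

-- translate a path by a vector
def pvShift (p : Int × Int) (l : List (Int × Int)) : List (Int × Int) :=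
  l.map (fun q => (p.1 + q.1, p.2 + q.2))

-- reference walk: positions visited from the origin, one move at a time
def pvW : List Char → List (Int × Int)
  | [] => [(0, 0)]
  | c :: cs =>
    (0, 0) :: pvShift (PySem.Dict.getD pvDELTA c (0, 0)) (pvW cs)

theorem pvShift_zero (l : List (Int × Int)) : pvShift (0, 0) l = l := by
  simp [pvShift]

theorem pvShift_shift (p q : Int × Int) (l : List (Int × Int)) :
    pvShift p (pvShift q l) = pvShift (p.1 + q.1, p.2 + q.2) l := by
  simp [pvShift, Function.comp, add_assoc]

theorem pvShift_append (p : Int × Int) (l1 l2 : List (Int × Int)) :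
    pvShift p (l1 ++ l2) = pvShift p l1 ++ pvShift p l2 := by
  simp [pvShift]

theorem pvW_head (cs : List Char) : pvW cs = (0, 0) :: (pvW cs).tail := by
  cases cs <;> rfl

theorem pvW_ne_nil (cs : List Char) : pvW cs ≠ [] := by
  cases cs <;> simp [pvW]

theorem pv_getLastD_shift (p : Int × Int) (l : List (Int × Int)) (h : l ≠ []) (d : Int × Int) :
    (pvShift p l).getLastD d = (p.1 + (l.getLastD d).1, p.2 + (l.getLastD d).2) := by
  obtain ⟨g, hg⟩ := Option.isSome_iff_exists.mp (List.getLast?_isSome.mpr h)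
  simp [pvShift, List.getLastD_eq_getLast?, List.getLast?_map, hg]

theorem pv_getLastD_cons_ne (a d : Int × Int) (l : List (Int × Int)) (h : l ≠ []) :
    (a :: l).getLastD d = l.getLastD d := by
  cases l with
  | nil => exact absurd rfl h
  | cons x xs => simp [List.getLastD_eq_getLast?]

-- one step of A's helper is a translation by the delta table's entry
theorem pv_step_eq (c : Char) (x y : Int) :
    get_next_house_cordinate (x, y) c =
      (x + (PySem.Dict.getD pvDELTA c (0, 0)).1, y + (PySem.Dict.getD pvDELTA c (0, 0)).2) := by
  have hd : pvDELTA = PySem.Dict.mk [('^', (0, 1)), ('>', (1, 0)), ('v', (0, -1)), ('<', (-1, 0))] := rfl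
  by_cases h1 : c = '^'
  · subst h1; simp [get_next_house_cordinate, hd, PySem.Dict.getD, PySem.Dict.get?]
  by_cases h2 : c = '>'
  · subst h2; simp [get_next_house_cordinate, hd, PySem.Dict.getD, PySem.Dict.get?]
  by_cases h3 : c = 'v'
  · subst h3
    simp [get_next_house_cordinate, hd, PySem.Dict.getD, PySem.Dict.get?, sub_eq_add_neg]
  by_cases h4 : c = '<'
  · subst h4
    simp [get_next_house_cordinate, hd, PySem.Dict.getD, PySem.Dict.get?, sub_eq_add_neg]
  · simp [get_next_house_cordinate, hd, PySem.Dict.getD, PySem.Dict.get?,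
      h1, h2, h3, h4, Ne.symm h1, Ne.symm h2, Ne.symm h3, Ne.symm h4]

-- A's accumulating fold produces the reference walk translated by the current position
theorem pvA_fold (cs : List Char) (acc : List (Int × Int)) (p : Int × Int) :
    (cs.foldl pvStepA (acc, p)).1 = acc ++ pvShift p (pvW cs).tail := by
  induction cs generalizing acc p with
  | nil => simp [pvW, pvShift]
  | cons c cs ih =>
    set d := PySem.Dict.getD pvDELTA c (0, 0) with hdd
    have hstep : get_next_house_cordinate p c = (p.1 + d.1, p.2 + d.2) := by
      simpa [← hdd] using pv_step_eq c p.1 p.2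
    have hs : pvStepA (acc, p) c =
        (acc ++ [(p.1 + d.1, p.2 + d.2)], (p.1 + d.1, p.2 + d.2)) := by
      simp [pvStepA, hstep]
    have h1 : pvShift p (pvW (c :: cs)).tail =
        (p.1 + d.1, p.2 + d.2) :: pvShift (p.1 + d.1, p.2 + d.2) (pvW cs).tail := by
      show pvShift p (pvShift d (pvW cs)) = _
      rw [pvShift_shift, pvW_head cs]
      simp [pvShift]
    rw [List.foldl_cons, hs, ih, h1]
    simp

theorem pvW_append (u v : List Char) :
    pvW (u ++ v) = pvW u ++ pvShift ((pvW u).getLastD (0, 0)) (pvW v).tail := by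
  induction u with
  | nil =>
    simp [pvW, pvShift_zero]
    exact (pvW_head v)
  | cons c u ih =>
    have hu := pvW_ne_nil u
    have hsh : pvShift (PySem.Dict.getD pvDELTA c (0, 0)) (pvW u) ≠ [] := by
      simp [pvShift, hu]
    calc pvW (c :: u ++ v)
        = (0, 0) :: pvShift (PySem.Dict.getD pvDELTA c (0, 0)) (pvW (u ++ v)) := rfl
      _ = (0, 0) :: pvShift (PySem.Dict.getD pvDELTA c (0, 0))
            (pvW u ++ pvShift ((pvW u).getLastD (0, 0)) (pvW v).tail) := by rw [ih]
      _ = ((0, 0) :: pvShift (PySem.Dict.getD pvDELTA c (0, 0)) (pvW u)) ++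
            pvShift ((PySem.Dict.getD pvDELTA c (0, 0)).1 + ((pvW u).getLastD (0, 0)).1,
                     (PySem.Dict.getD pvDELTA c (0, 0)).2 + ((pvW u).getLastD (0, 0)).2)
              (pvW v).tail := by
          simp [pvShift_append, pvShift_shift]
      _ = pvW (c :: u) ++ pvShift ((pvW (c :: u)).getLastD (0, 0)) (pvW v).tail := by
          have : (pvW (c :: u)).getLastD (0, 0) =
              ((PySem.Dict.getD pvDELTA c (0, 0)).1 + ((pvW u).getLastD (0, 0)).1,
               (PySem.Dict.getD pvDELTA c (0, 0)).2 + ((pvW u).getLastD (0, 0)).2) := by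
            show (((0, 0) : Int × Int) ::
              pvShift (PySem.Dict.getD pvDELTA c (0, 0)) (pvW u)).getLastD (0, 0) = _
            rw [pv_getLastD_cons_ne _ _ _ hsh, pv_getLastD_shift _ _ hu]
          rw [this]; rfl

-- B's divide-and-conquer walk equals the reference walk
theorem pvWalkB_eq (cs : List Char) : pvWalkB cs = pvW cs := by
  induction cs using pvWalkB.induct with
  | case1 => simp [pvWalkB, pvW]
  | case2 c => simp [pvWalkB, pvW, pvShift]
  | case3 c1 c2 rest mid ihl ihr =>
    rw [pvWalkB]
    have hm : mid = (c1 :: c2 :: rest).length / 2 := rfl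
    rw [hm] at ihl ihr
    simp only [ihl, ihr, List.drop_one]
    have h2 : ((pvW ((c1 :: c2 :: rest).drop ((c1 :: c2 :: rest).length / 2))).tail).map
        (fun q => (((pvW ((c1 :: c2 :: rest).take ((c1 :: c2 :: rest).length / 2))).getLastD (0, 0)).1 + q.1,
                   ((pvW ((c1 :: c2 :: rest).take ((c1 :: c2 :: rest).length / 2))).getLastD (0, 0)).2 + q.2)) =
        pvShift ((pvW ((c1 :: c2 :: rest).take ((c1 :: c2 :: rest).length / 2))).getLastD (0, 0))
          (pvW ((c1 :: c2 :: rest).drop ((c1 :: c2 :: rest).length / 2))).tail := rfl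
    rw [h2, ← pvW_append, List.take_append_drop]

-- ===== VERDICT (by name: the statement is the Claim_ definition above) =====
theorem get_all_house_visit_coordinates_spec : Claim_equal_get_all_house_visit_coordinates := by
  intro directions _
  unfold Spec_get_all_house_visit_coordinates get_all_house_visit_coordinates
    get_all_house_visit_coordinates_alt
  rw [pvWalkB_eq, pvA_fold, pvShift_zero]
  exact (List.singleton_append ▸ (pvW_head directions.toList).symm)
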